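-- pv_equiv track=rewrite | github.com/mansi35/Data-Structures-Algorithms | Python/ranking.py | removables
-- ===== SOURCE A (Python) =====
-- def removables(rels):
--     start = set([x[0] for x in rels])
--     ends = set([x[1] for x in rels])
--     both = start & ends
--
--     removables = set()
--     for x in start:
--         for y in ends:
--             if x + y not in rels:
--                 continue
--             for z in both:
--                 if x + z in rels and z + y in rels:
--                     removables.add(x+y)
--     return removables
-- ===== SOURCE B (Python) =====
-- def removables(rels):
--     edges = {s for s in rels if len(s) == 2}
--     starts = list(dict.fromkeys(s[0] for s in rels))
--     seconds = list(dict.fromkeys(s[1] for s in rels))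
--     out = set()
--     for x in starts:
--         succ_x = {s[1] for s in edges if s[0] == x}
--         reach = {s[1] for s in edges if s[0] in succ_x}
--         for y in seconds:
--             if y in succ_x and y in reach:
--                 out.add(x + y)
--     return out
-- ===== Notes on version B (the rewrite author's own statement) =====
-- stated objective: alternative
-- what changed: Replaces A's triple nested loop over start-chars x ends-chars x both-chars with repeated list-membership scans of rels by a precomputed edge set and, per start character, its successor set and two-step-reachable set, so each candidate pair is decided by two set-membership tests and the inner z-loop disappears.
import Mathlib
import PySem

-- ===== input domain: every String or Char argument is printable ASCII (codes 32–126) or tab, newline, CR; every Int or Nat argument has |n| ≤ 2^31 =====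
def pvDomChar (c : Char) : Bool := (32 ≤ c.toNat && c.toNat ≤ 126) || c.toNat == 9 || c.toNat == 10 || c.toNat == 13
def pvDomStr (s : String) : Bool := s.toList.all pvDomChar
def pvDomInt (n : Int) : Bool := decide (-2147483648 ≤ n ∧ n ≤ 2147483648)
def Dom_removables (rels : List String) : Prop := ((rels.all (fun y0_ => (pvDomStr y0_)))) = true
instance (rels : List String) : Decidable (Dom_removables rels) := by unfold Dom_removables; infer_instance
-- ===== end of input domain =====

-- B replaces A's triple loop over start×ends×both (with repeated list-membership scans) by one
-- precomputed edge set plus per-node successor / two-step-reachable sets; objective: alternative.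
-- Both return a Python set, so only the set of strings (not an order) is observable in Python.

-- ===== PORT A =====
def removables (rels : List String) : List String :=
  let start : PySem.Set Char := PySem.Set.ofList (rels.map (fun x => PySem.List.pyGetD x.toList 0 ' '))
  let ends : PySem.Set Char := PySem.Set.ofList (rels.map (fun x => PySem.List.pyGetD x.toList 1 ' '))
  let both : PySem.Set Char := PySem.Set.inter start ends
  let r : PySem.Set String := List.foldl (fun acc x =>
    List.foldl (fun acc y =>
      if ¬ String.ofList [x, y] ∈ rels then acc
      else List.foldl (fun acc z =>
        if String.ofList [x, z] ∈ rels ∧ String.ofList [z, y] ∈ rels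
        then PySem.Set.add acc (String.ofList [x, y]) else acc) acc both) acc ends) PySem.Set.empty start
  r

-- ===== PORT B =====
-- B-side helpers: the three set comprehensions of Source B
def pvEdges (rels : List String) : PySem.Set String :=
  PySem.Set.ofList (rels.filter (fun s => PySem.Str.len s == 2))

def pvSuccx (rels : List String) (x : Char) : PySem.Set Char :=
  PySem.Set.ofList (((pvEdges rels).filter
    (fun s => PySem.List.pyGetD s.toList 0 ' ' == x)).map (fun s => PySem.List.pyGetD s.toList 1 ' '))

def pvReach (rels : List String) (x : Char) : PySem.Set Char :=
  PySem.Set.ofList (((pvEdges rels).filter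
    (fun s => (pvSuccx rels x).contains (PySem.List.pyGetD s.toList 0 ' '))).map
      (fun s => PySem.List.pyGetD s.toList 1 ' '))

def removables_alt (rels : List String) : List String :=
  let starts : List Char := PySem.List.dedup (rels.map (fun s => PySem.List.pyGetD s.toList 0 ' '))
  let seconds : List Char := PySem.List.dedup (rels.map (fun s => PySem.List.pyGetD s.toList 1 ' '))
  let out : PySem.Set String := List.foldl (fun out x =>
    let succx := pvSuccx rels x
    let reach := pvReach rels x
    List.foldl (fun out y =>
      if y ∈ succx ∧ y ∈ reach then PySem.Set.add out (String.ofList [x, y]) else out) out seconds)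
    PySem.Set.empty starts
  out

-- ===== PRECONDITION & SPEC =====
-- Pre_ excludes exactly the inputs on which the Python raises IndexError: a string in rels
-- shorter than 2 characters makes x[1] (or x[0]) raise in A (and s[1] in B).
def Pre_removables (rels : List String) : Prop := ∀ s ∈ rels, 2 ≤ PySem.Str.len s
instance (rels : List String) : Decidable (Pre_removables rels) := by unfold Pre_removables; infer_instance
def pvWitness_removables : List String := ["ab", "bc", "ac"]
def Spec_removables (rels : List String) (out : List String) : Prop := out = removables_alt rels
instance (rels : List String) (out : List String) : Decidable (Spec_removables rels out) := by unfold Spec_removables; infer_instance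

-- ===== CLAIM (what is proved, stated in full; the proofs are below) =====
def Claim_equal_removables : Prop := ∀ (rels : List String), Dom_removables rels → Pre_removables rels → Spec_removables rels (removables rels)

-- ===== LEMMAS AND PROOFS =====

-- collapsing A's innermost z-loop: repeatedly (conditionally) adding the same element
lemma foldl_if_add {α : Type} [BEq α] [LawfulBEq α] (l : List Char) (p : Char → Prop)
    [DecidablePred p] (e : α) (acc : PySem.Set α) :
    List.foldl (fun a z => if p z then PySem.Set.add a e else a) acc l
      = if ∃ z ∈ l, p z then PySem.Set.add acc e else acc := by
  induction l generalizing acc with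
  | nil => simp
  | cons z l ih =>
    by_cases hz : p z
    · simp only [List.foldl_cons, if_pos hz, ih]
      have hmem : e ∈ PySem.Set.add acc e := by simp [PySem.Set.mem_add]
      have h1 : ∃ w ∈ z :: l, p w := ⟨z, by simp, hz⟩
      by_cases h : ∃ w ∈ l, p w
      · rw [if_pos h, if_pos h1, PySem.Set.add_of_mem hmem]
      · rw [if_neg h, if_pos h1]
    · simp only [List.foldl_cons, if_neg hz, ih]
      by_cases h : ∃ w ∈ l, p w
      · rw [if_pos h, if_pos (by rcases h with ⟨w, hw, hpw⟩; exact ⟨w, by simp [hw], hpw⟩)]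
      · rw [if_neg h, if_neg (by rintro ⟨w, hw, hpw⟩; rcases List.mem_cons.1 hw with rfl | hw'
                                 exacts [hz hpw, h ⟨w, hw', hpw⟩])]

-- membership in Source B's succ_x comprehension = "the two-character string x+b is in rels"
lemma mem_pvSuccx (rels : List String) (x b : Char) :
    b ∈ pvSuccx rels x ↔ String.ofList [x, b] ∈ rels := by
  simp only [pvSuccx, pvEdges, PySem.Set.mem_ofList, List.mem_map, List.mem_filter,
    PySem.Set.mem_ofList]
  constructor
  · rintro ⟨s, ⟨⟨hs, hlen⟩, hfc⟩, hsc⟩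
    have h2 : s.toList.length = 2 := by
      simp only [beq_iff_eq, PySem.Str.len_eq] at hlen; exact_mod_cast hlen
    rcases List.length_eq_two.1 h2 with ⟨c, d, hcd⟩
    have hx : c = x := by simpa [hcd, PySem.List.pyGetD] using hfc
    have hb : d = b := by simpa [hcd, PySem.List.pyGetD] using hsc
    have : s = String.ofList [x, b] := by
      rw [← hx, ← hb, ← hcd]; exact String.ofList_toList.symm
    rwa [← this]
  · intro h
    refine ⟨String.ofList [x, b], ⟨⟨h, ?_⟩, ?_⟩, ?_⟩ <;>
      simp [PySem.Str.len_eq, PySem.List.pyGetD]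

-- membership in Source B's reach comprehension = "some mid-point z links x to y"
lemma mem_pvReach (rels : List String) (x y : Char) :
    y ∈ pvReach rels x ↔ ∃ z, z ∈ pvSuccx rels x ∧ String.ofList [z, y] ∈ rels := by
  simp only [pvReach, pvEdges, PySem.Set.mem_ofList, List.mem_map, List.mem_filter,
    PySem.Set.mem_ofList]
  constructor
  · rintro ⟨s, ⟨⟨hs, hlen⟩, hfc⟩, hsc⟩
    have h2 : s.toList.length = 2 := by
      simp only [beq_iff_eq, PySem.Str.len_eq] at hlen; exact_mod_cast hlen
    rcases List.length_eq_two.1 h2 with ⟨c, d, hcd⟩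
    have hd : d = y := by simpa [hcd, PySem.List.pyGetD] using hsc
    refine ⟨c, ?_, ?_⟩
    · have := PySem.Set.contains_iff (pvSuccx rels x) c
      simpa [hcd, PySem.List.pyGetD] using hfc
    · have : s = String.ofList [c, y] := by
        rw [← hd, ← hcd]; exact String.ofList_toList.symm
      rwa [← this]
  · rintro ⟨z, hz, hzy⟩
    refine ⟨String.ofList [z, y], ⟨⟨hzy, ?_⟩, ?_⟩, ?_⟩ <;>
      simp [PySem.Str.len_eq, PySem.List.pyGetD, hz]

-- A's "∃ z in both" condition coincides with Source B's reach test
lemma exists_both_iff (rels : List String) (x y : Char) :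
    (∃ z ∈ PySem.Set.inter
        (PySem.Set.ofList (rels.map (fun s => PySem.List.pyGetD s.toList 0 ' ')))
        (PySem.Set.ofList (rels.map (fun s => PySem.List.pyGetD s.toList 1 ' '))),
      String.ofList [x, z] ∈ rels ∧ String.ofList [z, y] ∈ rels)
      ↔ y ∈ pvReach rels x := by
  rw [mem_pvReach]
  constructor
  · rintro ⟨z, _, hxz, hzy⟩
    exact ⟨z, (mem_pvSuccx rels x z).2 hxz, hzy⟩
  · rintro ⟨z, hz, hzy⟩
    have hxz := (mem_pvSuccx rels x z).1 hz
    refine ⟨z, ?_, hxz, hzy⟩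
    rw [PySem.Set.mem_inter]
    constructor
    · rw [PySem.Set.mem_ofList]
      exact List.mem_map.2 ⟨String.ofList [z, y], hzy, by simp [PySem.List.pyGetD]⟩
    · rw [PySem.Set.mem_ofList]
      exact List.mem_map.2 ⟨String.ofList [x, z], hxz, by simp [PySem.List.pyGetD]⟩

lemma removables_eq_alt (rels : List String) : removables rels = removables_alt rels := by
  simp only [removables, removables_alt, PySem.List.dedup_eq_ofList]
  congr 1
  funext acc x
  congr 1
  funext acc' y
  rw [foldl_if_add (p := fun z => String.ofList [x, z] ∈ rels ∧ String.ofList [z, y] ∈ rels)]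
  by_cases he : String.ofList [x, y] ∈ rels
  · rw [if_neg (by simpa using he)]
    by_cases hr : y ∈ pvReach rels x
    · rw [if_pos ((exists_both_iff rels x y).2 hr),
        if_pos ⟨(mem_pvSuccx rels x y).2 he, hr⟩]
    · rw [if_neg (fun h => hr ((exists_both_iff rels x y).1 h)),
        if_neg (fun h => hr h.2)]
  · rw [if_pos (by simpa using he),
      if_neg (fun h => he ((mem_pvSuccx rels x y).1 h.1))]

-- ===== VERDICT (by name: the statement is the Claim_ definition above) =====
theorem removables_spec : Claim_equal_removables := by
  intro rels _ _
  unfold Spec_removables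
  exact removables_eq_alt rels
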